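-- pv_equiv track=rewrite | github.com/StarSein/BaekJoon | 백준/Gold/14890. 경사로/경사로.py | solution
-- ===== SOURCE A (Python) =====
-- from collections import deque
-- from typing import List, Deque
--
-- def solution(n: int, l: int, grid: List[List[int]]) -> int:
--     def is_passable(road: Deque[int]) -> bool:
--         prev_h = road.popleft()
--         prev_cnt = 1
--         while road:
--             cur_h = road.popleft()
--             if prev_h == cur_h:
--                 prev_cnt += 1
--                 continue
--             elif prev_h == cur_h - 1:
--                 if prev_cnt < l:
--                     return False
--                 else:
--                     prev_cnt = 1
--             elif prev_h == cur_h + 1: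
--                 cur_cnt = 1
--                 while cur_cnt < l and road and road.popleft() == cur_h:
--                     cur_cnt += 1
--                 if cur_cnt != l:
--                     return False
--                 else:
--                     prev_cnt = 0
--             else:
--                 return False
--             prev_h = cur_h
--         return True
--
--     ans = 0
--     for row in grid:
--         if is_passable(deque(row)):
--             ans += 1
--     for c in range(n):
--         col = (grid[r][c] for r in range(n))
--         if is_passable(deque(col)):
--             ans += 1
--     return ans
-- ===== SOURCE B (Python) =====
-- def solution(n, l, grid):
--     # index-based line scan with ramp jumps and a 'free' pointer marking cells
--     # already consumed by a down-ramp (instead of A's deque popping + counters)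
--     def passable(h):
--         m = len(h)
--         i = 0
--         free = 0  # cells with index < free were consumed by a down-ramp
--         while i + 1 < m:
--             a, b = h[i], h[i + 1]
--             if a == b:
--                 i += 1
--             elif a + 1 == b:
--                 lo = i + 1 - l  # the up-ramp needs cells lo..i, flat and unconsumed
--                 if lo < free or any(h[k] != a for k in range(lo, i + 1)):
--                     return False
--                 i += 1
--             elif a == b + 1:
--                 hi = i + l  # the down-ramp occupies cells i+1..hi: nonempty, in bounds, flat
--                 if hi >= m or hi < i + 1 or any(h[k] != b for k in range(i + 1, hi + 1)):
--                     return False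
--                 free = hi + 1
--                 i = hi
--             else:
--                 return False
--         return True
--
--     return sum(passable(row) for row in grid) + sum(
--         passable([grid[r][c] for r in range(n)]) for c in range(n)
--     )
-- ===== Notes on version B (the rewrite author's own statement) =====
-- stated objective: alternative
-- what changed: B checks each line by scanning indices in place with ramp-length jumps and a 'free' pointer marking cells consumed by a down-ramp, instead of A's destructive deque popping with prev/cur run counters.
import Mathlib
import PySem

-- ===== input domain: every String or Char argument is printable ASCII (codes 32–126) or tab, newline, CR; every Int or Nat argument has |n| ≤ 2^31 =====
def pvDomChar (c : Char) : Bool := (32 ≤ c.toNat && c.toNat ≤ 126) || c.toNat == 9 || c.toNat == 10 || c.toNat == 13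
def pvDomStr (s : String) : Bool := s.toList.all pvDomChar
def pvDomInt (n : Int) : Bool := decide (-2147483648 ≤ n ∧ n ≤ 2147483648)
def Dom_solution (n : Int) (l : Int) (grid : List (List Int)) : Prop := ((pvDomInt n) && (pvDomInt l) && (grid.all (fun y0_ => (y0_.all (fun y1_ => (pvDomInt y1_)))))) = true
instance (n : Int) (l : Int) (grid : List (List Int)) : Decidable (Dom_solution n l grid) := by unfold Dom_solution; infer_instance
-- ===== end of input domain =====

-- B replaces A's deque-popping walk with counters by an index-based line scan with
-- ramp jumps and a 'free' pointer (alternative decomposition; similar cost).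


-- ===== PORT A =====
-- inner 'while cur_cnt < l and road and road.popleft() == cur_h' loop of is_passable
def takeDown (l cur : Int) (cnt : Int) : List Int → Int × List Int
  | [] => (cnt, [])
  | x :: rest =>
      if cnt < l then
        (if x == cur then takeDown l cur (cnt + 1) rest else (cnt, rest))
      else (cnt, x :: rest)

theorem takeDown_len (l cur : Int) : ∀ (cnt : Int) (road : List Int),
    (takeDown l cur cnt road).2.length ≤ road.length := by
  intro cnt road
  induction road generalizing cnt with
  | nil => simp [takeDown]
  | cons x rest ih =>
    simp only [takeDown]
    split
    · split
      · exact le_trans (ih _) (by simp)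
      · simp
    · simp

-- main 'while road' loop of is_passable (state: prev_h, prev_cnt, remaining deque)
def isPassA (l : Int) : Int → Int → List Int → Bool
  | _, _, [] => true
  | prevH, prevCnt, cur :: road =>
      if prevH == cur then isPassA l cur (prevCnt + 1) road
      else if prevH == cur - 1 then
        (if prevCnt < l then false else isPassA l cur 1 road)
      else if prevH == cur + 1 then
        (let r := takeDown l cur 1 road
         if r.1 != l then false else isPassA l cur 0 r.2)
      else false
termination_by _ _ road => road.length
decreasing_by
  all_goals simp
  all_goals (have := takeDown_len l cur 1 road; omega)

-- is_passable(deque(road)); Python raises IndexError on [] (excluded by Pre_)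
def isPassableA (l : Int) (road : List Int) : Bool :=
  match road with
  | [] => false
  | h :: rest => isPassA l h 1 rest

def solution (n : Int) (l : Int) (grid : List (List Int)) : Int :=
  let ansRows := grid.foldl (fun acc row => if isPassableA l row then acc + 1 else acc) (0 : Int)
  -- grid[r][c]: in bounds under Pre_ (Python raises IndexError otherwise)
  (List.range n.toNat).foldl
    (fun acc c =>
      if isPassableA l ((List.range n.toNat).map (fun r => (grid.getD r []).getD c 0)) then acc + 1
      else acc)
    ansRows

-- ===== PORT B =====
-- any(h[k] != v for k in range(a, b)); indices used are nonnegative and in bounds in Source B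
def anyNe (h : List Int) (v : Int) (a b : Int) : Bool :=
  if a < b then ((h.getD a.toNat 0) != v) || anyNe h v (a + 1) b else false
termination_by (b - a).toNat
decreasing_by omega

-- the 'while i + 1 < m' scan of passable; fuel (= len(h) at the call site) only makes
-- the jump i := i + l structurally terminating, it is never exhausted when l ≥ 1
def goB (l : Int) (h : List Int) : Nat → Int → Int → Bool
  | 0, _, _ => false
  | fuel + 1, i, free =>
      if i + 1 < (h.length : Int) then
        let a := h.getD i.toNat 0
        let b := h.getD (i + 1).toNat 0
        if a == b then goB l h fuel (i + 1) free
        else if a + 1 == b then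
          (if (i + 1 - l < free) || anyNe h a (i + 1 - l) (i + 1) then false
           else goB l h fuel (i + 1) free)
        else if a == b + 1 then
          (if (i + l ≥ (h.length : Int)) || (i + l < i + 1) || anyNe h b (i + 1) (i + l + 1) then
            false
           else goB l h fuel (i + l) (i + l + 1))
        else false
      else true

def isPassableB (l : Int) (h : List Int) : Bool := goB l h (h.length + 1) 0 0

def solution_alt (n : Int) (l : Int) (grid : List (List Int)) : Int :=
  ((grid.countP (fun row => isPassableB l row) : Nat) : Int) +
  (((List.range n.toNat).countP
      (fun c => isPassableB l ((List.range n.toNat).map (fun r => (grid.getD r []).getD c 0))) :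
      Nat) : Int)

-- ===== PRECONDITION & SPEC =====
-- Pre_ excludes exactly the inputs where the Python A raises IndexError: an empty row
-- (deque(row).popleft()) or a column index grid[r][c] out of range for r, c < n.
def Pre_solution (n : Int) (l : Int) (grid : List (List Int)) : Prop :=
  (∀ row ∈ grid, row ≠ []) ∧
    (0 < n → (n ≤ (grid.length : Int) ∧ ∀ row ∈ grid.take n.toNat, n ≤ (row.length : Int)))
instance (n : Int) (l : Int) (grid : List (List Int)) : Decidable (Pre_solution n l grid) := by
  unfold Pre_solution; infer_instance

def pvWitness_solution : Int × Int × List (List Int) := (2, 1, [[1, 2], [1, 1]])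

def Spec_solution (n : Int) (l : Int) (grid : List (List Int)) (out : Int) : Prop := out = solution_alt n l grid
instance (n : Int) (l : Int) (grid : List (List Int)) (out : Int) : Decidable (Spec_solution n l grid out) := by unfold Spec_solution; infer_instance

-- ===== CLAIM (what is proved, stated in full; the proofs are below) =====
def Claim_equal_solution : Prop := ∀ (n : Int) (l : Int) (grid : List (List Int)), Dom_solution n l grid → Pre_solution n l grid → Spec_solution n l grid (solution n l grid)

-- ===== LEMMAS AND PROOFS =====

theorem getD_drop (h : List Int) (n j : Nat) : (h.drop n).getD j 0 = h.getD (n + j) 0 := by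
  simp [List.getD_eq_getElem?_getD, List.getElem?_drop]

theorem anyNe_false_iff (h : List Int) (v : Int) (b : Int) : ∀ (a : Int), 0 ≤ a →
    (anyNe h v a b = false ↔ ∀ k : Nat, a ≤ (k : Int) → (k : Int) < b → h.getD k 0 = v) := by
  intro a ha
  generalize hd : (b - a).toNat = d
  induction d generalizing a with
  | zero =>
    rw [anyNe, if_neg (by omega)]
    simp only [true_iff]
    intro k hk1 hk2; omega
  | succ d ihd =>
    rw [anyNe, if_pos (by omega)]
    rw [Bool.or_eq_false_iff, ihd (a + 1) (by omega) (by omega)]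
    constructor
    · rintro ⟨h1, h2⟩ k hk1 hk2
      rcases eq_or_lt_of_le hk1 with heq | hlt
      · have : k = a.toNat := by omega
        subst this
        simpa using h1
      · exact h2 k (by omega) hk2
    · intro hall
      constructor
      · have := hall a.toNat (by omega) (by omega)
        simpa using this
      · intro k hk1 hk2
        exact hall k (by omega) hk2

theorem takeDown_eq_l_iff (l cur : Int) : ∀ (road : List Int) (c : Int), c ≤ l →
    ((takeDown l cur c road).1 = l ↔
      (l - c ≤ (road.length : Int) ∧ ∀ j : Nat, (j : Int) < l - c → road.getD j 0 = cur)) := by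
  intro road
  induction road with
  | nil =>
    intro c hc
    simp only [takeDown]
    constructor
    · intro hcl
      exact ⟨by simp; omega, fun j hj => by omega⟩
    · rintro ⟨h1, _⟩
      simp at h1; omega
  | cons x rest ih =>
    intro c hc
    by_cases hcl : c < l
    · rw [takeDown, if_pos hcl]
      by_cases hx : x = cur
      · rw [if_pos (by simp [hx]), ih (c + 1) (by omega)]
        constructor
        · rintro ⟨h1, h2⟩
          refine ⟨by simp; omega, ?_⟩
          intro j hj
          cases j with
          | zero => simpa using hx
          | succ j => simpa using h2 j (by omega)
        · rintro ⟨h1, h2⟩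
          refine ⟨by simp at h1 ⊢; omega, ?_⟩
          intro j hj
          simpa using h2 (j + 1) (by push_cast; omega)
      · rw [if_neg (by simp [hx])]
        simp only
        constructor
        · intro h1; omega
        · rintro ⟨h1, h2⟩
          exact absurd (by simpa using h2 0 (by omega)) hx
    · rw [takeDown, if_neg hcl]
      simp only
      constructor
      · intro _
        exact ⟨by omega, fun j hj => by omega⟩
      · intro _; omega

theorem takeDown_rest (l cur : Int) : ∀ (road : List Int) (c : Int), c ≤ l →
    (∀ j : Nat, (j : Int) < l - c → road.getD j 0 = cur) → l - c ≤ (road.length : Int) →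
    (takeDown l cur c road).2 = road.drop (l - c).toNat := by
  intro road
  induction road with
  | nil =>
    intro c hc _ hlen
    simp only [takeDown, List.drop_nil]
  | cons x rest ih =>
    intro c hc hall hlen
    by_cases hcl : c < l
    · rw [takeDown, if_pos hcl]
      have hx : x = cur := by simpa using hall 0 (by omega)
      rw [if_pos (by simp [hx])]
      rw [ih (c + 1) (by omega) (fun j hj => by simpa using hall (j + 1) (by push_cast; omega))
          (by simp at hlen ⊢; omega)]
      have : (l - c).toNat = (l - (c + 1)).toNat + 1 := by omega
      rw [this, List.drop_succ_cons]
    · rw [takeDown, if_neg hcl]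
      have : (l - c).toNat = 0 := by omega
      rw [this, List.drop_zero]

theorem goB_eq (l : Int) (h : List Int) : ∀ (fuel : Nat) (i free : Nat) (prevCnt : Int),
    i < h.length → h.length - i ≤ fuel → free ≤ i + 1 → 0 ≤ prevCnt →
    (∀ t : Int, 1 ≤ t →
      (t ≤ prevCnt ↔ ((free : Int) ≤ (i : Int) + 1 - t ∧
        ∀ k : Nat, (i : Int) + 1 - t ≤ (k : Int) → k ≤ i → h.getD k 0 = h.getD i 0))) →
    isPassA l (h.getD i 0) prevCnt (h.drop (i + 1)) = goB l h fuel (i : Int) (free : Int) := by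
  intro fuel
  induction fuel with
  | zero => intro i free prevCnt h1 h2; omega
  | succ fuel ih =>
    intro i free prevCnt hi hfuel hfree hcnt hinv
    by_cases him : i + 1 < h.length
    case neg =>
      have hdrop : h.drop (i + 1) = [] := List.drop_eq_nil_of_le (by omega)
      rw [hdrop, goB, if_neg (by push_cast; omega), isPassA]
    case pos =>
      have hcast1 : ((i : Int)).toNat = i := by omega
      have hcast2 : ((i : Int) + 1).toNat = i + 1 := by omega
      have hdrop : h.drop (i + 1) = h.getD (i + 1) 0 :: h.drop (i + 2) := by
        rw [List.drop_eq_getElem_cons him, List.getD_eq_getElem _ _ him]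
      rw [hdrop, goB, if_pos (by push_cast; omega)]
      simp only [hcast1, hcast2]
      set A := h.getD i 0 with hA
      set Bv := h.getD (i + 1) 0 with hBv
      have hrec : ((i : Int) + 1) = ((i + 1 : Nat) : Int) := by push_cast; ring
      have heq2 : (i + 1) + 1 = i + 2 := by omega
      by_cases hab : A = Bv
      · -- equal step
        rw [isPassA, if_pos (by simp [beq_iff_eq]; omega), if_pos (by simp [beq_iff_eq]; omega)]
        rw [hrec, ← hab]
        have := ih (i + 1) free (prevCnt + 1) him (by omega) (by omega) (by omega) ?_
        · rw [heq2] at this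
          rw [show h.getD (i+1) 0 = A from hab.symm] at this
          exact this
        · intro t ht
          by_cases ht1 : t = 1
          · subst ht1
            simp only [iff_true_intro (by omega : (1:Int) ≤ prevCnt + 1), true_iff]
            refine ⟨by push_cast; omega, ?_⟩
            intro k hk1 hk2
            have : k = i + 1 := by omega
            subst this; rfl
          · have ht2 : 2 ≤ t := by omega
            have hprev := hinv (t - 1) (by omega)
            constructor
            · intro hle
              have hp := hprev.mp (by omega)
              refine ⟨by push_cast at hp ⊢; omega, ?_⟩
              intro k hk1 hk2
              rw [show h.getD (i+1) 0 = Bv from rfl]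
              rcases Nat.lt_or_ge k (i + 1) with hk | hk
              · rw [← hab]
                exact hp.2 k (by push_cast at hp ⊢; omega) (by omega)
              · have : k = i + 1 := by omega
                subst this; rfl
            · rintro ⟨hf, hall⟩
              have hstep : ∀ k : Nat, (i : Int) + 1 - (t - 1) ≤ (k : Int) → k ≤ i → h.getD k 0 = A := by
                intro k hk1 hk2
                rw [hab]
                exact hall k (by push_cast at hk1 ⊢; omega) (by omega)
              have hh := hprev.mpr ⟨by push_cast at hf ⊢; omega, hstep⟩
              omega
      · by_cases hup : A = Bv - 1
        · -- up step
          rw [isPassA, if_neg (by simp [beq_iff_eq]; omega), if_pos (by simp [beq_iff_eq]; omega)]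
          conv_rhs => rw [if_neg (show ¬((A == Bv) = true) by simp [beq_iff_eq]; omega),
            if_pos (show (A + 1 == Bv) = true by simp [beq_iff_eq]; omega)]
          have hkey : (prevCnt < l) ↔
              (((i : Int) + 1 - l < (free : Int)) ∨ anyNe h A ((i : Int) + 1 - l) ((i : Int) + 1) = true) := by
            by_cases hl : 1 ≤ l
            · have hinvl := hinv l hl
              by_cases hlo : (i : Int) + 1 - l < (free : Int)
              · simp only [hlo, true_or, iff_true]
                by_contra hge
                have := (hinvl.mp (by omega)).1
                omega
              · simp only [hlo, false_or]
                have hany := anyNe_false_iff h A ((i : Int) + 1) ((i : Int) + 1 - l) (by omega)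
                constructor
                · intro hlt
                  by_contra hfalse
                  simp only [Bool.not_eq_true] at hfalse
                  have hall := hany.mp hfalse
                  have := hinvl.mpr ⟨by omega, fun k hk1 hk2 => hall k (by omega) (by omega)⟩
                  omega
                · intro htrue
                  by_contra hge
                  have hall := (hinvl.mp (by omega)).2
                  rw [hany.mpr (fun k hk1 hk2 => hall k (by omega) (by omega))] at htrue
                  exact Bool.false_ne_true htrue
            · constructor
              · intro hlt; omega
              · intro hor
                rcases hor with hlo | hany
                · omega
                · rw [anyNe, if_neg (by omega)] at hany
                  exact absurd hany Bool.false_ne_true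
          by_cases hfail : prevCnt < l
          · rw [if_pos hfail]
            rw [if_pos (show ((decide ((i : Int) + 1 - l < (free : Int))) ||
                anyNe h A ((i : Int) + 1 - l) ((i : Int) + 1)) = true by
              rcases hkey.mp hfail with hc | hc
              · simp [hc]
              · simp [hc])]
          · rw [if_neg hfail]
            rw [if_neg (show ¬(((decide ((i : Int) + 1 - l < (free : Int))) ||
                anyNe h A ((i : Int) + 1 - l) ((i : Int) + 1)) = true) by
              simp only [Bool.or_eq_true, decide_eq_true_eq]
              intro hc
              exact hfail (hkey.mpr hc))]
            rw [hrec]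
            have := ih (i + 1) free 1 him (by omega) (by omega) (by omega) ?_
            · rw [heq2] at this
              exact this
            · intro t ht
              by_cases ht1 : t = 1
              · subst ht1
                simp only [iff_true_intro (le_refl (1:Int)), true_iff]
                refine ⟨by push_cast; omega, ?_⟩
                intro k hk1 hk2
                have : k = i + 1 := by omega
                subst this; rfl
              · have ht2 : 2 ≤ t := by omega
                constructor
                · intro hle; omega
                · rintro ⟨hf, hall⟩
                  have hki := hall i (by push_cast; omega) (by omega)
                  rw [show h.getD (i+1) 0 = Bv from rfl, ← hA] at hki
                  omega
        · by_cases hdn : A = Bv + 1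
          · -- down step
            rw [isPassA, if_neg (by simp [beq_iff_eq]; omega),
                if_neg (by simp [beq_iff_eq]; omega), if_pos (by simp [beq_iff_eq]; omega)]
            conv_rhs => rw [if_neg (show ¬((A == Bv) = true) by simp [beq_iff_eq]; omega),
              if_neg (show ¬((A + 1 == Bv) = true) by simp [beq_iff_eq]; omega),
              if_pos (show (A == Bv + 1) = true by simp [beq_iff_eq]; omega)]
            simp only []
            by_cases hl : 1 ≤ l
            · have hiff := takeDown_eq_l_iff l Bv (h.drop (i + 2)) 1 hl
              have hany := anyNe_false_iff h Bv ((i : Int) + l + 1) ((i : Int) + 1) (by omega)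
              have hcond : (takeDown l Bv 1 (h.drop (i + 2))).1 = l ↔
                  ¬ (((i : Int) + l ≥ (h.length : Int)) ∨ ((i : Int) + l < (i : Int) + 1) ∨
                     anyNe h Bv ((i : Int) + 1) ((i : Int) + l + 1) = true) := by
                rw [hiff]
                constructor
                · rintro ⟨hlen, hall⟩
                  push_neg
                  refine ⟨by simp at hlen; omega, by omega, ?_⟩
                  have hf : anyNe h Bv ((i : Int) + 1) ((i : Int) + l + 1) = false := by
                    apply hany.mpr
                    intro k hk1 hk2
                    rcases eq_or_lt_of_le hk1 with hk | hk
                    · have : k = i + 1 := by omega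
                      subst this; rfl
                    · have := hall (k - (i + 2)) (by push_cast; omega)
                      rw [getD_drop, show i + 2 + (k - (i + 2)) = k from by omega] at this
                      exact this
                  simp [hf]
                · intro hnot
                  push_neg at hnot
                  obtain ⟨hb1, hb2, hb3⟩ := hnot
                  simp only [ne_eq, Bool.not_eq_true] at hb3
                  have hall := hany.mp hb3
                  refine ⟨by simp; omega, ?_⟩
                  intro j hj
                  rw [getD_drop]
                  exact hall (i + 2 + j) (by push_cast; omega) (by push_cast; omega)
              by_cases hsucc : (takeDown l Bv 1 (h.drop (i + 2))).1 = l
              · have hnot := hcond.mp hsucc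
                push_neg at hnot
                obtain ⟨hb1, hb2, hb3⟩ := hnot
                simp only [ne_eq, Bool.not_eq_true] at hb3
                have hall := hany.mp hb3
                rw [if_neg (by simp [bne_iff_ne, hsucc])]
                rw [if_neg (show ¬(((decide ((i : Int) + l ≥ (h.length : Int)) ||
                    decide ((i : Int) + l < (i : Int) + 1)) ||
                    anyNe h Bv ((i : Int) + 1) ((i : Int) + l + 1)) = true) by
                  simp [hb3]; omega)]
                have hrest : (takeDown l Bv 1 (h.drop (i + 2))).2 = h.drop (i + l.toNat + 1) := by
                  rw [takeDown_rest l Bv (h.drop (i + 2)) 1 hl ((hiff.mp hsucc).2) (hiff.mp hsucc).1]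
                  rw [List.drop_drop]
                  congr 1
                  omega
                rw [hrest]
                set i' : Nat := i + l.toNat with hi'
                have hBvi' : h.getD i' 0 = Bv := by
                  rcases Nat.lt_or_ge i' (i + 2) with hc | hc
                  · have : i' = i + 1 := by omega
                    rw [this]
                  · exact hall i' (by push_cast; omega) (by push_cast; omega)
                have := ih i' (i' + 1) 0 (by omega) (by omega) (by omega) (by omega) ?_
                · rw [hBvi'] at this
                  rw [show i' + 1 = i + l.toNat + 1 from rfl] at this
                  rw [this]
                  congr 1 <;> push_cast <;> omega
                · intro t ht
                  constructor
                  · intro hle; omega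
                  · rintro ⟨hf, _⟩
                    push_cast at hf; omega
              · rw [if_pos (by simp [bne_iff_ne, hsucc])]
                have hor : ((i : Int) + l ≥ (h.length : Int)) ∨ ((i : Int) + l < (i : Int) + 1) ∨
                    anyNe h Bv ((i : Int) + 1) ((i : Int) + l + 1) = true := by
                  by_contra hc
                  exact hsucc (hcond.mpr hc)
                rw [if_pos (show (((decide ((i : Int) + l ≥ (h.length : Int)) ||
                    decide ((i : Int) + l < (i : Int) + 1)) ||
                    anyNe h Bv ((i : Int) + 1) ((i : Int) + l + 1)) = true) by
                  rcases hor with hc | hc | hc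
                  · simp [hc]
                  · simp [hc]
                  · simp [hc])]
            · -- l ≤ 0 : A's inner loop exits at once with count 1 ≠ l; B fails its hi ≥ i+1 test
              have h1 : (takeDown l Bv 1 (h.drop (i + 2))).1 = 1 := by
                cases hd : h.drop (i + 2) with
                | nil => rw [takeDown]
                | cons x rest => rw [takeDown, if_neg (by omega)]
              rw [if_pos (by simp [bne_iff_ne, h1]; omega)]
              rw [if_pos (by simp only [Bool.or_eq_true, decide_eq_true_eq]; exact Or.inl (Or.inr (by omega)))]
          · -- blocked step
            rw [isPassA, if_neg (by simp [beq_iff_eq]; omega),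
                if_neg (by simp [beq_iff_eq]; omega), if_neg (by simp [beq_iff_eq]; omega)]
            conv_rhs => rw [if_neg (show ¬((A == Bv) = true) by simp [beq_iff_eq]; omega),
              if_neg (show ¬((A + 1 == Bv) = true) by simp [beq_iff_eq]; omega),
              if_neg (show ¬((A == Bv + 1) = true) by simp [beq_iff_eq]; omega)]

theorem line_eq (l : Int) (h : List Int) (hne : h ≠ []) : isPassableA l h = isPassableB l h := by
  cases h with
  | nil => exact absurd rfl hne
  | cons x rest =>
    have hmain := goB_eq l (x :: rest) ((x :: rest).length + 1) 0 0 1 (by simp) (by simp)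
      (by omega) (by omega) ?_
    · simpa [isPassableA, isPassableB] using hmain
    · intro t ht
      by_cases ht1 : t = 1
      · subst ht1
        simp only [iff_true_intro (le_refl (1 : Int)), true_iff]
        refine ⟨by norm_num, ?_⟩
        intro k hk1 hk2
        have : k = 0 := by omega
        subst this; rfl
      · constructor
        · intro hle; omega
        · rintro ⟨hf, _⟩
          push_cast at hf; omega

theorem count_lines_eq (l : Int) (lines : List (List Int)) (hne : ∀ x ∈ lines, x ≠ []) :
    lines.foldl (fun acc row => if isPassableA l row then acc + 1 else acc) (0 : Int) =
      ((lines.countP (fun row => isPassableB l row) : Nat) : Int) := by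
  rw [PySem.List.foldl_count_if]
  have hc : lines.countP (fun row => isPassableA l row) =
      lines.countP (fun row => isPassableB l row) :=
    List.countP_congr (fun x hx => by rw [line_eq l x (hne x hx)])
  rw [hc]
  simp

-- ===== VERDICT (by name: the statement is the Claim_ definition above) =====
theorem solution_spec : Claim_equal_solution := by
  intro n l grid _ hpre
  unfold Spec_solution solution solution_alt
  obtain ⟨hrows, _⟩ := hpre
  simp only []
  rw [count_lines_eq l grid hrows, PySem.List.foldl_count_if]
  have hcolP : (List.range n.toNat).countP
        (fun c => isPassableA l ((List.range n.toNat).map (fun r => (grid.getD r []).getD c 0))) =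
      (List.range n.toNat).countP
        (fun c => isPassableB l ((List.range n.toNat).map (fun r => (grid.getD r []).getD c 0))) := by
    apply List.countP_congr
    intro c hc
    rw [line_eq]
    have hlt := List.mem_range.mp hc
    simp only [ne_eq, List.map_eq_nil_iff, List.range_eq_nil]
    omega
  rw [hcolP]
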